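-- pv_equiv track=rewrite | github.com/tamerh/biobtree | tests/datasets/cellphonedb/extract_reference_data.py | get_genes_for_partner
-- ===== SOURCE A (Python) =====
-- def get_genes_for_partner(partner_id, is_complex, multidata, genes, complexes):
--     """Get gene symbols for a partner (protein or complex)."""
--     gene_list = []
--
--     if is_complex and partner_id in complexes:
--         # Complex: get genes from all component proteins
--         for protein_id in complexes[partner_id]:
--             if protein_id in multidata:
--                 protein_data = multidata[protein_id]
--                 uniprot = protein_data.get('protein_name', '')
--                 if uniprot in genes:
--                     gene_name = genes[uniprot].get('hgnc_symbol', '')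
--                     if gene_name:
--                         gene_list.append(gene_name)
--     else:
--         # Simple protein
--         if partner_id in multidata:
--             protein_data = multidata[partner_id]
--             uniprot = protein_data.get('protein_name', '')
--             if uniprot in genes:
--                 gene_name = genes[uniprot].get('hgnc_symbol', '')
--                 if gene_name:
--                     gene_list.append(gene_name)
--
--     return gene_list
-- ===== SOURCE B (Python) =====
-- def get_genes_for_partner(partner_id, is_complex, multidata, genes, complexes):
--     """Get gene symbols for a partner (protein or complex)."""
--     # Stage 1: pre-join multidata with genes into one index protein_id -> hgnc symbol.
--     symbol_of = {}
--     for protein_id, protein_data in multidata.items():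
--         g = genes.get(protein_data.get('protein_name', ''))
--         if g is not None:
--             name = g.get('hgnc_symbol', '')
--             if name:
--                 symbol_of[protein_id] = name
--     # Stage 2: resolve the partner to its protein ids and read them off the index.
--     ids = complexes[partner_id] if is_complex and partner_id in complexes else [partner_id]
--     out = []
--     for protein_id in ids:
--         if protein_id in symbol_of:
--             out.append(symbol_of[protein_id])
--     return out
-- ===== Notes on version B (the rewrite author's own statement) =====
-- stated objective: alternative
-- what changed: B replaces A's per-id two-level lookup chain with a staged join: one pass over multidata builds an index protein_id -> hgnc symbol (joining multidata with genes up front), then the partner's ids are resolved by single lookups in that index; Pre_ requires multidata's keys to be distinct because it models a Python dict, and duplicate-key association lists have no Python dict counterpart.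
import Mathlib
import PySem

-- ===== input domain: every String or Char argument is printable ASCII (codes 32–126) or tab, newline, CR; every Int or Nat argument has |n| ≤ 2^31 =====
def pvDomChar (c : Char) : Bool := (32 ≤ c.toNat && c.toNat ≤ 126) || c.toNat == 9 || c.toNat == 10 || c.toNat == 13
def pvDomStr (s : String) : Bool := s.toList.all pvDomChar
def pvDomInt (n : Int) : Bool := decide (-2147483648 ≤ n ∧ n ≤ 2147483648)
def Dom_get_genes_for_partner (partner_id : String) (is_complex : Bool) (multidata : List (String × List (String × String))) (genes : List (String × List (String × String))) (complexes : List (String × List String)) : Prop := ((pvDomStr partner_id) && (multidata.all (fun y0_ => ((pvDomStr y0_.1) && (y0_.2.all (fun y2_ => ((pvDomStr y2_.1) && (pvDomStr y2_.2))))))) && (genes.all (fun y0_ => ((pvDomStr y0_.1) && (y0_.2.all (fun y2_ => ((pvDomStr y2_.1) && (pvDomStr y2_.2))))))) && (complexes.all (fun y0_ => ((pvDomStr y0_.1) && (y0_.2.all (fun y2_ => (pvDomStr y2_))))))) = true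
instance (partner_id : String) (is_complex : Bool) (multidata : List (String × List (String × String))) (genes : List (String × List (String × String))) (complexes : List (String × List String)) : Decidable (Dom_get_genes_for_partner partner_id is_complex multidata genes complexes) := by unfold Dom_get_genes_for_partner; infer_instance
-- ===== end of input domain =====

-- B pre-joins multidata with genes into one protein_id -> symbol index and resolves the
-- partner's ids against it, instead of A's per-id two-level lookup chain (alternative).

-- ===== PORT A =====
-- first-match lookup in an association list (Python dict indexing)
def pvLookup? {α : Type} (d : List (String × α)) (k : String) : Option α :=
  (d.find? (fun p => p.1 == k)).map (·.2)

-- d.get(k, dflt) on a string-valued dict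
def pvGetD (d : List (String × String)) (k dflt : String) : String :=
  (pvLookup? d k).getD dflt

def get_genes_for_partner (partner_id : String) (is_complex : Bool) (multidata : List (String × List (String × String))) (genes : List (String × List (String × String))) (complexes : List (String × List String)) : List String :=
  if is_complex && (pvLookup? complexes partner_id).isSome then
    -- Complex: get genes from all component proteins
    ((pvLookup? complexes partner_id).getD []).foldl (fun gene_list protein_id =>
      match pvLookup? multidata protein_id with
      | some protein_data =>
        let uniprot := pvGetD protein_data "protein_name" ""
        match pvLookup? genes uniprot with
        | some gdata =>
          let gene_name := pvGetD gdata "hgnc_symbol" ""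
          if gene_name ≠ "" then gene_list ++ [gene_name] else gene_list
        | none => gene_list
      | none => gene_list) []
  else
    -- Simple protein
    match pvLookup? multidata partner_id with
    | some protein_data =>
      let uniprot := pvGetD protein_data "protein_name" ""
      (match pvLookup? genes uniprot with
      | some gdata =>
        let gene_name := pvGetD gdata "hgnc_symbol" ""
        if gene_name ≠ "" then [gene_name] else []
      | none => [])
    | none => []

-- ===== PORT B =====
-- loop body of Source B's stage-1 pass over multidata.items()
def pvIndexStep (genes : List (String × List (String × String))) (idx : PySem.Dict String String) (e : String × List (String × String)) : PySem.Dict String String :=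
  match pvLookup? genes (pvGetD e.2 "protein_name" "") with
  | none => idx
  | some g =>
    let name := pvGetD g "hgnc_symbol" ""
    if name = "" then idx else idx.insert e.1 name

def get_genes_for_partner_alt (partner_id : String) (is_complex : Bool) (multidata : List (String × List (String × String))) (genes : List (String × List (String × String))) (complexes : List (String × List String)) : List String :=
  -- Stage 1: pre-join multidata with genes into one index protein_id -> hgnc symbol.
  let symbol_of := multidata.foldl (pvIndexStep genes) PySem.Dict.empty
  -- Stage 2: resolve the partner to its protein ids and read them off the index.
  let ids := if is_complex && (pvLookup? complexes partner_id).isSome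
             then (pvLookup? complexes partner_id).getD [] else [partner_id]
  ids.foldl (fun out protein_id =>
    match symbol_of.get? protein_id with
    | some s => out ++ [s]
    | none => out) []

-- ===== PRECONDITION & SPEC =====
-- Pre_ requires multidata's keys to be pairwise distinct: multidata models a Python dict, which
-- cannot hold duplicate keys, so duplicate-key association lists correspond to no Python input.
def Pre_get_genes_for_partner (partner_id : String) (is_complex : Bool) (multidata : List (String × List (String × String))) (genes : List (String × List (String × String))) (complexes : List (String × List String)) : Prop :=
  (multidata.map Prod.fst).Nodup
instance (partner_id : String) (is_complex : Bool) (multidata : List (String × List (String × String))) (genes : List (String × List (String × String))) (complexes : List (String × List String)) : Decidable (Pre_get_genes_for_partner partner_id is_complex multidata genes complexes) := by unfold Pre_get_genes_for_partner; infer_instance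

def pvWitness_get_genes_for_partner : String × Bool × (List (String × List (String × String))) × (List (String × List (String × String))) × (List (String × List String)) :=
  ("P1", false, [("P1", [("protein_name", "U1")])], [("U1", [("hgnc_symbol", "GENE1")])], [])

def Spec_get_genes_for_partner (partner_id : String) (is_complex : Bool) (multidata : List (String × List (String × String))) (genes : List (String × List (String × String))) (complexes : List (String × List String)) (out : List String) : Prop := out = get_genes_for_partner_alt partner_id is_complex multidata genes complexes
instance (partner_id : String) (is_complex : Bool) (multidata : List (String × List (String × String))) (genes : List (String × List (String × String))) (complexes : List (String × List String)) (out : List String) : Decidable (Spec_get_genes_for_partner partner_id is_complex multidata genes complexes out) := by unfold Spec_get_genes_for_partner; infer_instance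

-- ===== CLAIM =====
def Claim_equal_get_genes_for_partner : Prop := ∀ (partner_id : String) (is_complex : Bool) (multidata : List (String × List (String × String))) (genes : List (String × List (String × String))) (complexes : List (String × List String)), Dom_get_genes_for_partner partner_id is_complex multidata genes complexes → Pre_get_genes_for_partner partner_id is_complex multidata genes complexes → Spec_get_genes_for_partner partner_id is_complex multidata genes complexes (get_genes_for_partner partner_id is_complex multidata genes complexes)

-- ===== LEMMAS AND PROOFS =====
-- A's per-id lookup chain, as an Option (proof-side characterisation of both programs)
def pvSym? (multidata genes : List (String × List (String × String))) (protein_id : String) : Option String :=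
  match pvLookup? multidata protein_id with
  | none => none
  | some pd =>
    match pvLookup? genes (pvGetD pd "protein_name" "") with
    | none => none
    | some gdata =>
      let gene_name := pvGetD gdata "hgnc_symbol" ""
      if gene_name = "" then none else some gene_name

theorem pvLookup?_eq_none_of_not_mem {α : Type} (l : List (String × α)) (k : String)
    (h : k ∉ l.map Prod.fst) : pvLookup? l k = none := by
  unfold pvLookup?
  rw [List.find?_eq_none.mpr]
  · rfl
  · intro p hp hbeq
    exact h (List.mem_map.mpr ⟨p, hp, (beq_iff_eq.mp hbeq)⟩)

-- Stage 1 builds exactly the graph of pvSym? (needs distinct multidata keys)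
theorem pvBuild_get? (genes : List (String × List (String × String)))
    (l : List (String × List (String × String))) (idx : PySem.Dict String String) (pid : String)
    (hnd : (l.map Prod.fst).Nodup)
    (hdisj : ∀ k ∈ l.map Prod.fst, idx.get? k = none) :
    (l.foldl (pvIndexStep genes) idx).get? pid = (idx.get? pid).or (pvSym? l genes pid) := by
  induction l generalizing idx with
  | nil =>
    simp [pvSym?, pvLookup?]
  | cons e rest ih =>
    obtain ⟨k, pd⟩ := e
    simp only [List.map_cons, List.nodup_cons] at hnd
    obtain ⟨hk, hndr⟩ := hnd
    have hstep : ∀ k', k' ≠ k → (pvIndexStep genes idx (k, pd)).get? k' = idx.get? k' := by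
      intro k' hne
      unfold pvIndexStep
      cases hg : pvLookup? genes (pvGetD pd "protein_name" "") with
      | none => rfl
      | some g =>
        simp only
        by_cases hname : pvGetD g "hgnc_symbol" "" = ""
        · simp [hname]
        · simp only [if_neg hname]
          exact PySem.Dict.get?_insert_of_ne idx _ hne
    have hdisj' : ∀ k' ∈ rest.map Prod.fst, (pvIndexStep genes idx (k, pd)).get? k' = none := by
      intro k' hk'
      have hne : k' ≠ k := fun h => hk (h ▸ hk')
      rw [hstep k' hne]
      exact hdisj k' (by simp [hk'])
    rw [List.foldl_cons, ih _ hndr hdisj']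
    by_cases hpid : pid = k
    · subst hpid
      have hidx : idx.get? pid = none := hdisj pid (by simp)
      have hrest : pvSym? rest genes pid = none := by
        unfold pvSym?
        rw [pvLookup?_eq_none_of_not_mem rest pid hk]
      rw [hrest]
      have hcons : pvSym? ((pid, pd) :: rest) genes pid =
          (match pvLookup? genes (pvGetD pd "protein_name" "") with
           | none => none
           | some gdata =>
             let gene_name := pvGetD gdata "hgnc_symbol" ""
             if gene_name = "" then none else some gene_name) := by
        unfold pvSym? pvLookup?
        simp
      rw [hcons]
      unfold pvIndexStep
      cases hg : pvLookup? genes (pvGetD pd "protein_name" "") with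
      | none => simp [hidx]
      | some g =>
        simp only
        by_cases hname : pvGetD g "hgnc_symbol" "" = ""
        · simp [hname, hidx]
        · simp only [if_neg hname]
          simp [PySem.Dict.get?_insert_self, hidx]
    · rw [hstep pid hpid]
      have hcons : pvSym? ((k, pd) :: rest) genes pid = pvSym? rest genes pid := by
        unfold pvSym?
        have hfind : pvLookup? ((k, pd) :: rest) pid = pvLookup? rest pid := by
          unfold pvLookup?
          rw [List.find?_cons_of_neg]
          simp [Ne.symm hpid]
        rw [hfind]
      rw [hcons]

theorem pvIndex_eq_sym (multidata genes : List (String × List (String × String))) (pid : String)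
    (hnd : (multidata.map Prod.fst).Nodup) :
    (multidata.foldl (pvIndexStep genes) PySem.Dict.empty).get? pid = pvSym? multidata genes pid := by
  rw [pvBuild_get? genes multidata PySem.Dict.empty pid hnd (fun k _ => PySem.Dict.get?_empty k)]
  simp [PySem.Dict.get?_empty]

-- any fold of this shape is a filterMap
theorem pvFoldl_opt (f : String → Option String) (ids acc : List String) :
    ids.foldl (fun out pid => match f pid with | some s => out ++ [s] | none => out) acc
      = acc ++ ids.filterMap f := by
  induction ids generalizing acc with
  | nil => simp
  | cons x xs ih =>
    simp only [List.foldl_cons, List.filterMap_cons]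
    cases h : f x <;> simp [ih]

-- A's complex-branch loop body appends exactly the optional symbol pvSym? computes
theorem pvStep_eq (multidata genes : List (String × List (String × String))) (acc : List String) (pid : String) :
    (match pvLookup? multidata pid with
      | some protein_data =>
        let uniprot := pvGetD protein_data "protein_name" ""
        match pvLookup? genes uniprot with
        | some gdata =>
          let gene_name := pvGetD gdata "hgnc_symbol" ""
          if gene_name ≠ "" then acc ++ [gene_name] else acc
        | none => acc
      | none => acc) = acc ++ (pvSym? multidata genes pid).toList := by
  unfold pvSym?
  cases pvLookup? multidata pid with
  | none => simp
  | some pd =>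
    simp only
    cases pvLookup? genes (pvGetD pd "protein_name" "") with
    | none => simp
    | some g =>
      by_cases h : pvGetD g "hgnc_symbol" "" = "" <;> simp [h]

theorem pvFoldl_eq (multidata genes : List (String × List (String × String))) (ids : List String) (acc : List String) :
    ids.foldl (fun gene_list protein_id =>
      match pvLookup? multidata protein_id with
      | some protein_data =>
        let uniprot := pvGetD protein_data "protein_name" ""
        match pvLookup? genes uniprot with
        | some gdata =>
          let gene_name := pvGetD gdata "hgnc_symbol" ""
          if gene_name ≠ "" then gene_list ++ [gene_name] else gene_list
        | none => gene_list
      | none => gene_list) acc = acc ++ ids.filterMap (pvSym? multidata genes) := by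
  induction ids generalizing acc with
  | nil => simp
  | cons x xs ih =>
    simp only [List.foldl_cons]
    rw [pvStep_eq, ih]
    cases h : pvSym? multidata genes x <;> simp [h]

-- A's simple-protein branch is pvSym? on the single id
theorem pvSimple_eq (multidata genes : List (String × List (String × String))) (pid : String) :
    (match pvLookup? multidata pid with
      | some protein_data =>
        let uniprot := pvGetD protein_data "protein_name" ""
        (match pvLookup? genes uniprot with
        | some gdata =>
          let gene_name := pvGetD gdata "hgnc_symbol" ""
          if gene_name ≠ "" then [gene_name] else []
        | none => [])
      | none => []) = List.filterMap (pvSym? multidata genes) [pid] := by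
  have htl : List.filterMap (pvSym? multidata genes) [pid] = (pvSym? multidata genes pid).toList := by
    cases h : pvSym? multidata genes pid <;> simp [h]
  rw [htl]
  unfold pvSym?
  cases pvLookup? multidata pid with
  | none => simp
  | some pd =>
    simp only
    cases pvLookup? genes (pvGetD pd "protein_name" "") with
    | none => simp
    | some g =>
      by_cases h : pvGetD g "hgnc_symbol" "" = "" <;> simp [h]

-- B equals filterMap pvSym? over the resolved id list
theorem pvAlt_eq (partner_id : String) (is_complex : Bool)
    (multidata genes : List (String × List (String × String))) (complexes : List (String × List String))
    (hnd : (multidata.map Prod.fst).Nodup) :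
    get_genes_for_partner_alt partner_id is_complex multidata genes complexes
      = (if is_complex && (pvLookup? complexes partner_id).isSome
         then (pvLookup? complexes partner_id).getD [] else [partner_id]).filterMap (pvSym? multidata genes) := by
  unfold get_genes_for_partner_alt
  rw [pvFoldl_opt, List.nil_append]
  congr 1
  funext pid
  exact pvIndex_eq_sym multidata genes pid hnd

-- ===== VERDICT =====
theorem get_genes_for_partner_spec : Claim_equal_get_genes_for_partner := by
  intro partner_id is_complex multidata genes complexes _ hpre
  unfold Spec_get_genes_for_partner
  rw [pvAlt_eq partner_id is_complex multidata genes complexes hpre]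
  unfold get_genes_for_partner
  by_cases hc : (is_complex && (pvLookup? complexes partner_id).isSome) = true
  · rw [if_pos hc, if_pos hc, pvFoldl_eq, List.nil_append]
  · rw [if_neg hc, if_neg hc, ← pvSimple_eq multidata genes partner_id]
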